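-- pv_equiv track=rewrite | github.com/pypi-data/pypi-mirror-97 | packages/imio.history/imio.history-1.22.tar.gz/imio.history-1.22/src/imio/history/adapters.py | _build_history_with_previous_review_state
-- ===== SOURCE A (Python) =====
-- def _build_history_with_previous_review_state(history_data):
--     """Include 'previous_review_state' key in every hisotry event."""
--     res = []
--     previous_event = None
--     for event in history_data:
--         new_event = event.copy()
--         new_event['previous_review_state'] = previous_event and previous_event['review_state'] or None
--         previous_event = new_event.copy()
--         res.append(new_event)
--     return res
-- ===== SOURCE B (Python) =====
-- def _build_history_with_previous_review_state(history_data):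
--     """Include 'previous_review_state' key in every history event."""
--     events = list(history_data)
--     prev_states = [None] + [e['review_state'] for e in events[:-1]]
--     res = []
--     for event, ps in zip(events, prev_states):
--         new_event = event.copy()
--         new_event['previous_review_state'] = ps or None
--         res.append(new_event)
--     return res
-- ===== Notes on version B (the rewrite author's own statement) =====
-- stated objective: alternative
-- what changed: Replaces the in-loop previous_event bookkeeping with a precomputed shifted list of predecessor review_states ([None] + [e['review_state'] for e in events[:-1]]) zipped with the events in a second pass.
import Mathlib
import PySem

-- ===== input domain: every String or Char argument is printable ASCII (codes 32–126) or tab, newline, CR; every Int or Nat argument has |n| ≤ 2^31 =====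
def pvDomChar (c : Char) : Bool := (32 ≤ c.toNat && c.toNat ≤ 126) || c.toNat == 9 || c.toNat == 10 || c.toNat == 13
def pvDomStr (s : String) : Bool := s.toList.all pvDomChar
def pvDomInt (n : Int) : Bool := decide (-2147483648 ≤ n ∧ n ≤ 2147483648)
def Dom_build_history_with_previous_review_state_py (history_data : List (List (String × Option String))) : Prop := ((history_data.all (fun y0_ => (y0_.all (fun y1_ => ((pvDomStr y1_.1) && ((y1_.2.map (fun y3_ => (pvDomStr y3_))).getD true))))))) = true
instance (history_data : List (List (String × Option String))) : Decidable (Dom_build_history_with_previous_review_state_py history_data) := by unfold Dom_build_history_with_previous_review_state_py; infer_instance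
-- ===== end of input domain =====

-- B replaces A's in-loop previous_event bookkeeping by a precomputed shifted list of
-- predecessor review_states zipped with the events (alternative decomposition, same cost).
-- Events (Python dicts) are association lists; dict operations go through PySem.Dict.

-- Python truthiness of a value that is None or a str: truthy iff a non-empty string.
def pvTruthy (v : Option String) : Bool :=
  match v with
  | none => false
  | some s => s ≠ ""

-- ===== PORT A =====
-- 'previous_event and previous_event['review_state'] or None'
-- (previous_event['review_state'] on a missing key raises KeyError in Python: excluded by Pre_;
--  the port uses getD none there, which Pre_ makes unreachable)
def pvPrevA (pe? : Option (PySem.Dict String (Option String))) : Option String :=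
  match pe? with
  | none => none
  | some pe =>
    if pe.items = [] then none
    else
      let v := pe.getD "review_state" none
      if pvTruthy v then v else none

def build_history_with_previous_review_state_py (history_data : List (List (String × Option String))) : List (List (String × Option String)) :=
  (history_data.foldl
    (fun (st : List (List (String × Option String)) × Option (PySem.Dict String (Option String))) event =>
      let new_event := (PySem.Dict.mk event).insert "previous_review_state" (pvPrevA st.2)
      (st.1 ++ [new_event.items], some new_event))
    ([], none)).1

-- ===== PORT B =====
def pvRS (e : List (String × Option String)) : Option String :=
  (PySem.Dict.mk e).getD "review_state" none  -- e['review_state']; KeyError excluded by Pre_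

def build_history_with_previous_review_state_py_alt (history_data : List (List (String × Option String))) : List (List (String × Option String)) :=
  let events := history_data
  let prev_states : List (Option String) :=
    none :: (PySem.List.slice events none (some (-1))).map pvRS
  (events.zip prev_states).map
    (fun p =>
      ((PySem.Dict.mk p.1).insert "previous_review_state"
        (if pvTruthy p.2 then p.2 else none)).items)

-- ===== PRECONDITION & SPEC =====
-- Pre_ excludes exactly the inputs where Python raises KeyError: every event except
-- possibly the last must carry the 'review_state' key (both A and B raise there).
def Pre_build_history_with_previous_review_state_py (history_data : List (List (String × Option String))) : Prop :=
  ∀ e ∈ history_data.dropLast, e.any (fun p => p.1 == "review_state") = true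
instance (history_data : List (List (String × Option String))) : Decidable (Pre_build_history_with_previous_review_state_py history_data) := by unfold Pre_build_history_with_previous_review_state_py; infer_instance

def pvWitness_build_history_with_previous_review_state_py : (List (List (String × Option String))) :=
  [[("review_state", some "private"), ("actor", some "admin")], [("review_state", some "published")]]

def Spec_build_history_with_previous_review_state_py (history_data : List (List (String × Option String))) (out : List (List (String × Option String))) : Prop := out = build_history_with_previous_review_state_py_alt history_data
instance (history_data : List (List (String × Option String))) (out : List (List (String × Option String))) : Decidable (Spec_build_history_with_previous_review_state_py history_data out) := by unfold Spec_build_history_with_previous_review_state_py; infer_instance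

-- ===== CLAIM (what is proved, stated in full; the proofs are below) =====
def Claim_equal_build_history_with_previous_review_state_py : Prop := ∀ (history_data : List (List (String × Option String))), Dom_build_history_with_previous_review_state_py history_data → Pre_build_history_with_previous_review_state_py history_data → Spec_build_history_with_previous_review_state_py history_data (build_history_with_previous_review_state_py history_data)

-- ===== LEMMAS AND PROOFS =====

-- normalisation 'v or None'
def pvOrNone (v : Option String) : Option String := if pvTruthy v then v else none

-- the common recursive core both ports compute: q0 is the (already or-None-ed)
-- previous_review_state of the first event
def pvCore (l : List (List (String × Option String))) (q0 : Option String) : List (List (String × Option String)) :=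
  match l with
  | [] => []
  | e :: l' =>
    ((PySem.Dict.mk e).insert "previous_review_state" q0).items :: pvCore l' (pvOrNone (pvRS e))

theorem items_insert_ne_nil (d : PySem.Dict String (Option String)) (k : String) (v : Option String) :
    (d.insert k v).items ≠ [] := by
  rw [PySem.Dict.items_insert]
  split
  · rename_i hc
    intro h
    rw [List.map_eq_nil_iff] at h
    rw [PySem.Dict.contains_iff_mem_keys] at hc
    simp [PySem.Dict.keys, h] at hc
  · simp

theorem pvPrevA_some (e : List (String × Option String)) (q : Option String) :
    pvPrevA (some ((PySem.Dict.mk e).insert "previous_review_state" q)) = pvOrNone (pvRS e) := by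
  simp only [pvPrevA, pvRS, pvOrNone]
  rw [if_neg (items_insert_ne_nil _ _ _)]
  rw [PySem.Dict.getD_insert]
  rw [if_neg (by decide : ¬("review_state" = "previous_review_state"))]

theorem foldA_core (l : List (List (String × Option String)))
    (acc : List (List (String × Option String)))
    (pe? : Option (PySem.Dict String (Option String))) :
    (l.foldl
      (fun (st : List (List (String × Option String)) × Option (PySem.Dict String (Option String))) event =>
        let new_event := (PySem.Dict.mk event).insert "previous_review_state" (pvPrevA st.2)
        (st.1 ++ [new_event.items], some new_event))
      (acc, pe?)).1 = acc ++ pvCore l (pvPrevA pe?) := by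
  induction l generalizing acc pe? with
  | nil => simp [pvCore]
  | cons e l ih =>
    simp only [List.foldl_cons]
    rw [ih]
    rw [pvPrevA_some]
    simp [pvCore]

theorem zipB_core (l : List (List (String × Option String))) (p : Option String) :
    (l.zip (p :: l.dropLast.map pvRS)).map
      (fun q =>
        ((PySem.Dict.mk q.1).insert "previous_review_state"
          (if pvTruthy q.2 then q.2 else none)).items)
      = pvCore l (pvOrNone p) := by
  induction l generalizing p with
  | nil => simp [pvCore]
  | cons e l ih =>
    cases l with
    | nil => simp [pvCore, pvOrNone]
    | cons e' l' =>
      simp only [List.dropLast_cons_of_ne_nil (by simp : e' :: l' ≠ []), List.map_cons,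
        List.zip_cons_cons, List.map_cons] at *
      rw [ih]
      simp [pvCore, pvOrNone]

-- ===== VERDICT (by name: the statement is the Claim_ definition above) =====
theorem build_history_with_previous_review_state_py_spec : Claim_equal_build_history_with_previous_review_state_py := by
  intro hd _ _
  unfold Spec_build_history_with_previous_review_state_py
  unfold build_history_with_previous_review_state_py build_history_with_previous_review_state_py_alt
  rw [foldA_core]
  simp only [PySem.List.slice_to_neg_one]
  rw [zipB_core]
  simp [pvPrevA, pvOrNone]
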